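-- pv_equiv track=rewrite | github.com/boxucu/aoc-2024 | day_18_Solvable_Maze.py | corrupted_map
-- ===== SOURCE A (Python) =====
-- def corrupted_map(Nx, Ny, corrupted_bytes):
--     map = []
--     for y in range(0, Ny):
--         line = []
--         for x in range(0, Nx):
--             if (x, y) in corrupted_bytes:
--                 line.append("#")
--             else:
--                 line.append(".")
--         map.append("".join(line))
--
--     return map
-- ===== SOURCE B (Python) =====
-- def corrupted_map(Nx, Ny, corrupted_bytes):
--     grid = [["."] * Nx for _ in range(Ny)]
--     for x, y in corrupted_bytes:
--         if 0 <= x < Nx and 0 <= y < Ny: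
--             grid[y][x] = "#"
--     return ["".join(row) for row in grid]
-- ===== Notes on version B (the rewrite author's own statement) =====
-- stated objective: faster
-- what changed: B allocates the full '.' grid once and scatter-writes '#' at each in-bounds corrupted coordinate, instead of scanning every cell and testing list membership for each.
import Mathlib
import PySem

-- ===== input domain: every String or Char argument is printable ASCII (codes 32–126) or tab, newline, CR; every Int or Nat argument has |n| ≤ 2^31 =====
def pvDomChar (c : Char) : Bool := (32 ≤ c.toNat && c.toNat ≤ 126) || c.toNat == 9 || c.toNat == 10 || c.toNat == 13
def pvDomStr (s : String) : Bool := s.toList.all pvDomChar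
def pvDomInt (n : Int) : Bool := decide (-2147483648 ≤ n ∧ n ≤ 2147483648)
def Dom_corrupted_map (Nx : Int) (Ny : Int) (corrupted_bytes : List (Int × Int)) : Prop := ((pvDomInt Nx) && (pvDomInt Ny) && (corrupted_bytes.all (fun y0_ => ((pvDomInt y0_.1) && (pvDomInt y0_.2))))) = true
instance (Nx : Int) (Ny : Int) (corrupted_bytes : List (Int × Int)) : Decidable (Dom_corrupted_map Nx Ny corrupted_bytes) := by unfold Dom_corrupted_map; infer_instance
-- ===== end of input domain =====

-- B replaces A's per-cell membership scan by one scatter-write pass over the obstacle list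
-- (objective: faster — O(Nx*Ny + k) instead of O(Nx*Ny*k)).

-- ===== PORT A =====
-- literal transliteration of A: for y in range(Ny): for x in range(Nx): append '#' or '.'
def corrupted_map (Nx : Int) (Ny : Int) (corrupted_bytes : List (Int × Int)) : List String :=
  (PySem.List.pyRange 0 Ny 1).foldl (fun map y =>
    map ++ [String.ofList ((PySem.List.pyRange 0 Nx 1).foldl (fun line x =>
      line ++ [if (x, y) ∈ corrupted_bytes then '#' else '.']) [])]) []

-- ===== PORT B =====
-- one scatter write: grid[y][x] = '#' for an in-bounds corrupted coordinate (x, y)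
def bWrite (Nx : Int) (Ny : Int) (g : List (List Char)) (p : Int × Int) : List (List Char) :=
  if 0 ≤ p.1 ∧ p.1 < Nx ∧ 0 ≤ p.2 ∧ p.2 < Ny then
    g.modify p.2.toNat (fun row => row.set p.1.toNat '#')
  else g

def corrupted_map_alt (Nx : Int) (Ny : Int) (corrupted_bytes : List (Int × Int)) : List String :=
  ((corrupted_bytes.foldl (bWrite Nx Ny)
      ((PySem.List.pyRange 0 Ny 1).map (fun _ => List.replicate Nx.toNat '.')))).map
    (fun row => String.ofList row)

-- ===== PRECONDITION & SPEC =====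
def Spec_corrupted_map (Nx : Int) (Ny : Int) (corrupted_bytes : List (Int × Int)) (out : List String) : Prop := out = corrupted_map_alt Nx Ny corrupted_bytes
instance (Nx : Int) (Ny : Int) (corrupted_bytes : List (Int × Int)) (out : List String) : Decidable (Spec_corrupted_map Nx Ny corrupted_bytes out) := by unfold Spec_corrupted_map; infer_instance

-- ===== CLAIM (what is proved, stated in full; the proofs are below) =====
def Claim_equal_corrupted_map : Prop := ∀ (Nx : Int) (Ny : Int) (corrupted_bytes : List (Int × Int)), Dom_corrupted_map Nx Ny corrupted_bytes → Spec_corrupted_map Nx Ny corrupted_bytes (corrupted_map Nx Ny corrupted_bytes)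

-- ===== LEMMAS AND PROOFS =====

-- A's append-accumulator loop is a map
theorem foldl_append_map {α β : Type} (l : List α) (acc : List β) (f : α → β) :
    l.foldl (fun a x => a ++ [f x]) acc = acc ++ l.map f := by
  induction l generalizing acc with
  | nil => simp
  | cons x xs ih => simp [ih]

-- does obstacle p hit cell (column i, row j)?
def hit (Nx Ny : Int) (p : Int × Int) (j i : Nat) : Bool :=
  decide (0 ≤ p.1 ∧ p.1 < Nx ∧ 0 ≤ p.2 ∧ p.2 < Ny) && (p.2.toNat == j) && (p.1.toNat == i)

def cell (g : List (List Char)) (j i : Nat) : Option Char :=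
  g[j]?.bind (fun r => r[i]?)

theorem cell_write (Nx Ny : Int) (p : Int × Int) (g : List (List Char)) (j i : Nat) :
    cell (bWrite Nx Ny g p) j i
      = (cell g j i).map (fun c => if hit Nx Ny p j i then '#' else c) := by
  unfold bWrite hit
  split
  · rename_i hb
    simp only [decide_eq_true hb, Bool.true_and, cell, List.getElem?_modify]
    by_cases hj : p.2.toNat = j
    · simp only [hj, beq_self_eq_true, Bool.true_and]
      cases hg : g[j]? with
      | none => simp
      | some r =>
        simp only [Option.bind_some]
        by_cases hi : p.1.toNat = i
        · by_cases hlen : i < r.length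
          · simp [hi, hlen]
          · simp [hi, hlen]
        · simp [hi]
    · have : (p.2.toNat == j) = false := by simpa using hj
      simp [hj, this]
  · rename_i hb
    have : decide (0 ≤ p.1 ∧ p.1 < Nx ∧ 0 ≤ p.2 ∧ p.2 < Ny) = false := by simpa using hb
    simp [this, cell]

theorem cell_foldl (Nx Ny : Int) (cb : List (Int × Int)) (g : List (List Char)) (j i : Nat) :
    cell (cb.foldl (bWrite Nx Ny) g) j i
      = (cell g j i).map (fun c => if cb.any (fun p => hit Nx Ny p j i) then '#' else c) := by
  induction cb generalizing g with
  | nil => cases h : cell g j i <;> simp [h]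
  | cons p cb ih =>
    simp only [List.foldl_cons, ih, cell_write, Option.map_map, List.any_cons]
    cases h : cell g j i with
    | none => simp
    | some c =>
      simp only [Option.map_some, Option.some.injEq, Function.comp]
      by_cases hh : hit Nx Ny p j i <;> by_cases ha : cb.any (fun p => hit Nx Ny p j i) <;>
        simp [hh, ha]

-- the fold preserves the shape of the grid (number of rows, each row's length)
theorem foldl_length (Nx Ny : Int) (cb : List (Int × Int)) (g : List (List Char)) :
    (cb.foldl (bWrite Nx Ny) g).length = g.length := by
  induction cb generalizing g with
  | nil => rfl
  | cons p cb ih =>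
    simp only [List.foldl_cons, ih]
    unfold bWrite; split <;> simp

theorem foldl_rowlen (Nx Ny : Int) (cb : List (Int × Int)) (g : List (List Char)) (j : Nat) :
    ((cb.foldl (bWrite Nx Ny) g)[j]?).map List.length = (g[j]?).map List.length := by
  induction cb generalizing g with
  | nil => rfl
  | cons p cb ih =>
    simp only [List.foldl_cons, ih]
    unfold bWrite; split
    · simp only [List.getElem?_modify]
      cases h : g[j]? <;> simp [apply_ite List.length]
    · rfl

-- any-obstacle-hits-cell equals membership of the cell's coordinates, for an in-grid cell
theorem any_hit_eq_mem (Nx Ny : Int) (cb : List (Int × Int)) (j i : Nat)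
    (hi : i < Nx.toNat) (hj : j < Ny.toNat) :
    cb.any (fun p => hit Nx Ny p j i) = decide (((i : Int), (j : Int)) ∈ cb) := by
  by_cases hmem : ((i : Int), (j : Int)) ∈ cb
  · simp only [hmem, decide_true]
    apply List.any_eq_true.mpr
    refine ⟨((i : Int), (j : Int)), hmem, ?_⟩
    simp only [hit, Bool.and_eq_true, decide_eq_true_eq, beq_iff_eq]
    omega
  · simp only [hmem, decide_false]
    apply List.any_eq_false.mpr
    intro p hp
    obtain ⟨a, b⟩ := p
    simp only [hit, Bool.and_eq_true, decide_eq_true_eq, beq_iff_eq, not_and]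
    intro hb h5
    have ha : a = (i : Int) := by omega
    have hbb : b = (j : Int) := by omega
    exact absurd (by rw [← ha, ← hbb]; exact hp) hmem

-- ===== VERDICT (by name: the statement is the Claim_ definition above) =====
theorem corrupted_map_spec : Claim_equal_corrupted_map := by
  intro Nx Ny cb _
  unfold Spec_corrupted_map corrupted_map corrupted_map_alt
  have hgrid : cb.foldl (bWrite Nx Ny) ((PySem.List.pyRange 0 Ny 1).map (fun _ => List.replicate Nx.toNat '.'))
      = (PySem.List.pyRange 0 Ny 1).map (fun y => (PySem.List.pyRange 0 Nx 1).map
          (fun x => if (x, y) ∈ cb then '#' else '.')) := by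
    set g0 : List (List Char) := (PySem.List.pyRange 0 Ny 1).map (fun _ => List.replicate Nx.toNat '.') with hg0
    have hg0len : g0.length = Ny.toNat := by
      rw [hg0, List.length_map, PySem.List.length_pyRange_one]; omega
    have hGlen : (cb.foldl (bWrite Nx Ny) g0).length = Ny.toNat := by
      rw [foldl_length]; exact hg0len
    apply List.ext_getElem?
    intro j
    by_cases hj : j < Ny.toNat
    · have hR : ((PySem.List.pyRange 0 Ny 1).map (fun y => (PySem.List.pyRange 0 Nx 1).map
          (fun x => if (x, y) ∈ cb then '#' else '.')))[j]?
          = some ((PySem.List.pyRange 0 Nx 1).map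
          (fun x => if (x, (j : Int)) ∈ cb then '#' else '.')) := by
        rw [List.getElem?_map, PySem.List.getElem?_pyRange_one]
        simp only [sub_zero, if_pos hj, Option.map_some, zero_add]
      rw [hR]
      obtain ⟨r, hr⟩ : ∃ r, (cb.foldl (bWrite Nx Ny) g0)[j]? = some r :=
        ⟨_, List.getElem?_eq_getElem (by omega)⟩
      rw [hr]
      have hg0j : g0[j]? = some (List.replicate Nx.toNat '.') := by
        rw [hg0, List.getElem?_map, PySem.List.getElem?_pyRange_one]
        simp only [sub_zero, if_pos hj, Option.map_some]
      have hrlen : r.length = Nx.toNat := by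
        have := foldl_rowlen Nx Ny cb g0 j
        rw [hr, hg0j] at this
        simpa using this
      congr 1
      apply List.ext_getElem?
      intro i
      by_cases hi : i < Nx.toNat
      · have hcell : cell (cb.foldl (bWrite Nx Ny) g0) j i
            = some (if ((i : Int), (j : Int)) ∈ cb then '#' else '.') := by
          rw [cell_foldl]
          have hc0 : cell g0 j i = some '.' := by
            simp [cell, hg0j, hi]
          rw [hc0]
          simp only [Option.map_some, any_hit_eq_mem Nx Ny cb j i hi hj]
          by_cases hm : ((i : Int), (j : Int)) ∈ cb <;> simp [hm]
        have hri : cell (cb.foldl (bWrite Nx Ny) g0) j i = r[i]? := by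
          simp [cell, hr]
        rw [← hri, hcell, List.getElem?_map, PySem.List.getElem?_pyRange_one]
        simp only [sub_zero, if_pos hi, Option.map_some, zero_add]
      · rw [List.getElem?_eq_none (by omega),
            List.getElem?_eq_none (by rw [List.length_map, PySem.List.length_pyRange_one]; omega)]
    · rw [List.getElem?_eq_none (by omega),
          List.getElem?_eq_none (by rw [List.length_map, PySem.List.length_pyRange_one]; omega)]
  simp only [foldl_append_map, List.nil_append, hgrid, List.map_map]
  rfl
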